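-- pv_equiv track=rewrite | github.com/p-dros/University | sem-5/python/assignment-1/task_1.py | parse_factors
-- ===== SOURCE A (Python) =====
-- def parse_factors(factors: list[int]) -> str:
--     factor_counts = {}
--
--     for factor in factors:
--         if factor in factor_counts:
--             factor_counts[factor] += 1
--         else:
--             factor_counts[factor] = 1
--     factor_strs = []
--     for factor, count in factor_counts.items():
--         if count == 1:
--             factor_strs.append(str(factor))
--         else:
--             factor_strs.append(f"{factor}^{count}")
--     return "*".join(factor_strs)
-- ===== SOURCE B (Python) =====
-- def parse_factors(factors: list[int]) -> str:
--     # Partition worklist: peel off the first remaining factor with its full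
--     # multiplicity, then drop all its occurrences and continue.
--     parts = []
--     remaining = factors
--     while remaining:
--         head = remaining[0]
--         count = remaining.count(head)
--         parts.append(str(head) if count == 1 else f"{head}^{count}")
--         remaining = [f for f in remaining if f != head]
--     return "*".join(parts)
-- ===== Notes on version B (the rewrite author's own statement) =====
-- stated objective: alternative
-- what changed: Replaces A's two staged passes (build a frequency dict, then format its items) with a partition worklist: repeatedly peel off the first remaining factor together with its full multiplicity (remaining.count) and drop all its occurrences, then join the pieces with '*'.
import Mathlib
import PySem

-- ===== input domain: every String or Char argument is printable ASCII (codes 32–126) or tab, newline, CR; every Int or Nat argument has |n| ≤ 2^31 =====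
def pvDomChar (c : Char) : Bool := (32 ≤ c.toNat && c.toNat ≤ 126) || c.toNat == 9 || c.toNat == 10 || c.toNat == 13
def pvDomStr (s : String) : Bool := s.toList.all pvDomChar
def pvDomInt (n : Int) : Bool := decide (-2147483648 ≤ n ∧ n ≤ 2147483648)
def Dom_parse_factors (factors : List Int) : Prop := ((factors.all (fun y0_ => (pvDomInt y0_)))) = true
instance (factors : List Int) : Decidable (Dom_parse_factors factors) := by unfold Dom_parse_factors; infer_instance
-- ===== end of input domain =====

-- B replaces A's frequency dict + second formatting loop by a partition worklist:
-- peel the first remaining factor with its full multiplicity, drop all its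
-- occurrences, repeat (alternative decomposition, not faster).


-- ===== PORT A =====
-- f"{factor}^{count}" / str(factor), applied to one (factor, count) item
def pfFmtA (p : Int × Int) : String :=
  if p.2 == 1 then PySem.Int.toStr p.1
  else PySem.Str.join "" [PySem.Int.toStr p.1, "^", PySem.Int.toStr p.2]

def parse_factors (factors : List Int) : String :=
  let factor_counts : PySem.Dict Int Int :=
    factors.foldl
      (fun d factor =>
        if d.contains factor then d.insert factor (d.getD factor 0 + 1)
        else d.insert factor 1)
      PySem.Dict.empty
  let factor_strs : List String :=
    factor_counts.items.foldl (fun acc p => acc ++ [pfFmtA p]) []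
  PySem.Str.join "*" factor_strs

-- ===== PORT B =====
-- the while loop: peel remaining[0] with its multiplicity, drop its occurrences
def pfParts (remaining : List Int) : List String :=
  match remaining with
  | [] => []
  | head :: rest =>
    -- count = remaining.count(head)
    let count : Int := (PySem.List.count (head :: rest) head : Int)
    -- parts.append(str(head) if count == 1 else f"{head}^{count}")
    let part : String :=
      if count == 1 then PySem.Int.toStr head
      else PySem.Str.join "" [PySem.Int.toStr head, "^", PySem.Int.toStr count]
    -- remaining = [f for f in remaining if f != head]
    part :: pfParts ((head :: rest).filter (fun f => !(f == head)))
termination_by remaining.length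
decreasing_by
  simp only [List.filter_cons, beq_self_eq_true, Bool.not_true, Bool.false_eq_true,
    if_false, List.length_cons, Nat.lt_succ_iff]
  exact le_trans (List.length_filter_le _ _) (by simp)

def parse_factors_alt (factors : List Int) : String :=
  PySem.Str.join "*" (pfParts factors)

-- ===== PRECONDITION & SPEC =====
def Spec_parse_factors (factors : List Int) (out : String) : Prop := out = parse_factors_alt factors
instance (factors : List Int) (out : String) : Decidable (Spec_parse_factors factors out) := by unfold Spec_parse_factors; infer_instance

-- ===== CLAIM =====
def Claim_equal_parse_factors : Prop := ∀ (factors : List Int), Dom_parse_factors factors → Spec_parse_factors factors (parse_factors factors)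

-- ===== LEMMAS AND PROOFS =====

-- A's counting loop is Counter(factors)
lemma pfCounts_eq (factors : List Int) :
    factors.foldl
      (fun d factor =>
        if d.contains factor then d.insert factor (d.getD factor 0 + 1)
        else d.insert factor 1)
      PySem.Dict.empty = PySem.Dict.counter factors := by
  rw [← PySem.Dict.foldl_insert_getD_add_one_eq_counter]
  have hstep : (fun (d : PySem.Dict Int Int) factor =>
      if d.contains factor then d.insert factor (d.getD factor 0 + 1)
      else d.insert factor 1)
      = (fun d factor => d.insert factor (d.getD factor 0 + 1)) := by
    funext d factor
    by_cases h : d.contains factor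
    · simp [h]
    · simp only [Bool.not_eq_true] at h
      simp [h, PySem.Dict.getD_of_not_contains d 0 h]
  rw [hstep]

-- A's value, characterised: the distinct factors in first-occurrence order, formatted with their counts
lemma pfA_char (factors : List Int) :
    parse_factors factors
      = PySem.Str.join "*"
          ((PySem.Set.ofList factors).map (fun k => pfFmtA (k, (factors.count k : Int)))) := by
  simp only [parse_factors]
  rw [pfCounts_eq, PySem.List.foldl_append_singleton_eq_map, PySem.Dict.items_counter, List.map_map]
  rfl

-- set(l after removing x) = set(l) minus x
lemma pfDiscard_eq (s : PySem.Set Int) (x : Int) :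
    s.discard x = s.filter (fun f => !(f == x)) := rfl

lemma pfOfList_filter (l : List Int) (x : Int) :
    PySem.Set.ofList (l.filter (fun f => !(f == x)))
      = (PySem.Set.ofList l).filter (fun f => !(f == x)) := by
  induction l with
  | nil => simp [PySem.Set.ofList_nil]
  | cons a l ih =>
    by_cases hax : a = x
    · subst hax
      rw [PySem.Set.ofList_cons, pfDiscard_eq]
      simp only [List.filter_cons, beq_self_eq_true, Bool.not_true, Bool.false_eq_true, if_false, ih]
      rw [List.filter_filter]
      exact (List.filter_congr (fun y _ => by by_cases h : y = a <;> simp [h])).symm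
    · have hne : (!(a == x)) = true := by simp [hax]
      simp only [List.filter_cons, hne, if_true, PySem.Set.ofList_cons,
        pfDiscard_eq, ih, List.filter_filter]
      exact congrArg _ (List.filter_congr (fun y _ => by rw [Bool.and_comm]))

-- the worklist produces the distinct factors in first-occurrence order, formatted with their counts
lemma pfMain (factors : List Int) :
    pfParts factors
      = (PySem.Set.ofList factors).map (fun k => pfFmtA (k, (factors.count k : Int))) := by
  induction hn : factors.length using Nat.strong_induction_on generalizing factors with
  | _ n ih =>
  cases factors with
  | nil => rw [pfParts]; rfl
  | cons x l =>
    subst hn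
    have hfx : (x :: l).filter (fun f => !(f == x)) = l.filter (fun f => !(f == x)) := by
      simp
    have hF : (l.filter (fun f => !(f == x))).length < (x :: l).length :=
      Nat.lt_succ_of_le (List.length_filter_le _ l)
    have ihF := ih _ hF (l.filter (fun f => !(f == x))) rfl
    have hmapeq : (PySem.Set.ofList (l.filter (fun f => !(f == x)))).map
          (fun k => pfFmtA (k, (((x :: l).count k : Nat) : Int)))
        = (PySem.Set.ofList (l.filter (fun f => !(f == x)))).map
          (fun k => pfFmtA (k, (((l.filter (fun f => !(f == x))).count k : Nat) : Int))) := by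
      apply List.map_congr_left
      intro k hk
      have hkmem : k ∈ l.filter (fun f => !(f == x)) := (PySem.Set.mem_ofList _ _).mp hk
      have hkx : ¬(k = x) := by
        have := List.of_mem_filter hkmem
        simpa using this
      have h1 : (x :: l).count k = l.count k := by
        simp [List.count_cons]
        simp [show ¬ x = k from fun he => hkx he.symm]
      have h2 : (l.filter (fun f => !(f == x))).count k = l.count k := by
        rw [List.count_filter]; simp [hkx]
      rw [h1, h2]
    have hhead : (if ((PySem.List.count (x :: l) x : Int) == 1) then PySem.Int.toStr x
        else PySem.Str.join "" [PySem.Int.toStr x, "^", PySem.Int.toStr (PySem.List.count (x :: l) x : Int)])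
        = pfFmtA (x, (((x :: l).count x : Nat) : Int)) := by
      simp [pfFmtA, PySem.List.count_eq]
    rw [pfParts]
    simp only [hfx, ihF]
    rw [PySem.Set.ofList_cons, pfDiscard_eq, ← pfOfList_filter, List.map_cons, hmapeq, hhead]

-- ===== VERDICT =====
theorem parse_factors_spec : Claim_equal_parse_factors := by
  intro factors _
  show parse_factors factors = parse_factors_alt factors
  rw [pfA_char, parse_factors_alt, pfMain]
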